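-- pv_equiv track=rewrite | github.com/LEEHYUNDONG/codingTest | codingTest_python/programmers/printStartoPoints.py | solution
-- ===== SOURCE A (Python) =====
-- def solution(line):
--     answer = []
--     vertex = []
--     for i in range(len(line)):
--         a, b, c = line[i]
--         for j in range(len(line)):
--             d, e, f = line[j]
--             if a*e == b*d or i == j:
--                 continue
--             if (b*f-e*c) % (a*e-b*d) == 0 and (a*f-d*c) % (a*e-b*d) == 0:
--                 vertex.append(((b*f-e*c)//(a*e-b*d), (d*c-a*f)//(a*e-b*d)))
--
--     vertex = list(set(vertex))
--     maxV, minV = max(vertex)[0], min(vertex)[0]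
--     xx = [i[0] for i in vertex]
--     yy = [i[1] for i in vertex]
--     maxX, minX = max(xx), min(xx)
--     maxY, minY = max(yy), min(yy)
--     answer = [["."]*(maxX-minX+1) for _ in range(maxY-minY+1)]
--
--     if len(vertex) == 1:
--         return ['*']
--     else:
--         for x, y in vertex:
--             answer[y-minY][x-minX] = '*'
--         for i in range(len(answer)):
--             answer[i] = ''.join(answer[i])
--         return answer[::-1]
-- ===== SOURCE B (Python) =====
-- def solution(line):
--     n = len(line)
--     pts = set()
--     for i in range(n):
--         a, b, c = line[i]
--         for j in range(i + 1, n):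
--             d, e, f = line[j]
--             den = a * e - b * d
--             if den == 0:
--                 continue
--             px, py = b * f - e * c, d * c - a * f
--             if px % den == 0 and py % den == 0:
--                 pts.add((px // den, py // den))
--     xs = [p[0] for p in pts]
--     ys = [p[1] for p in pts]
--     minx, maxx = min(xs), max(xs)
--     miny, maxy = min(ys), max(ys)
--     if len(pts) == 1:
--         return ['*']
--     rows = {}
--     for x, y in pts:
--         rows[y] = rows.get(y, []) + [x]
--     out = []
--     for y in range(maxy, miny - 1, -1):
--         cols = sorted(rows.get(y, []))
--         parts = []
--         prev = minx
--         for x in cols: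
--             parts.append('.' * (x - prev))
--             parts.append('*')
--             prev = x + 1
--         parts.append('.' * (maxx - prev + 1))
--         out.append(''.join(parts))
--     return out
-- ===== Notes on version B (the rewrite author's own statement) =====
-- stated objective: alternative
-- what changed: B enumerates only unordered pairs i<j (the intersection of (i,j) and (j,i) is the same point, so half the pair loop disappears) and renders without any grid or per-cell test: points are bucketed by y into a dict, and each output row is assembled by run-length gap-filling between the row's sorted x-coordinates ('.'*gap + '*'), sweeping y downward, instead of A's pre-filled grid, scatter-writes, row joins and final reversal.
import Mathlib
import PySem

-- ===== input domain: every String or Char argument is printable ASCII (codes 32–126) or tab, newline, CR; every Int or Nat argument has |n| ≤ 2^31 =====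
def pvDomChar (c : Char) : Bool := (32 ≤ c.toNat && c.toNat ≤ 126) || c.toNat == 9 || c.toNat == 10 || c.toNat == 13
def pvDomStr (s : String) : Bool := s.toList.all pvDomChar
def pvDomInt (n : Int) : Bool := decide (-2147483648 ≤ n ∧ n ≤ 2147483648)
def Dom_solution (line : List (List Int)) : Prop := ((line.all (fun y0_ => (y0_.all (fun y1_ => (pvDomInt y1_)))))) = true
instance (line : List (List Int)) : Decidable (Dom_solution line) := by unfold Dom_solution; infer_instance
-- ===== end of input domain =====

-- B enumerates only the unordered pairs i<j (the (i,j) and (j,i) intersections coincide) into a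
-- set, groups the points by y into a dict, and renders each row by run-length gap-filling between
-- the row's sorted x's, sweeping y downward — no grid, no scatter-writes, no per-cell test, no
-- final reversal (objective: alternative; same return value on Pre_, both raise outside it).

-- shared accessor: the unpacking 'a, b, c = line[i]' (exact under Pre_, which forces length 3)
def tri (l : List Int) : Int × Int × Int := (l.getD 0 0, l.getD 1 0, l.getD 2 0)

-- ===== PORT A =====
-- the nested intersection loop of A, appending to the list 'vertex'
def aVertex (line : List (List Int)) : List (Int × Int) :=
  let n : Int := line.length
  (PySem.List.pyRange 0 n 1).foldl (fun v i =>
    let t := tri (PySem.List.pyGetD line i [])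
    (PySem.List.pyRange 0 n 1).foldl (fun v j =>
      let u := tri (PySem.List.pyGetD line j [])
      if t.1 * u.2.1 = t.2.1 * u.1 ∨ i = j then v
      else
        if PySem.Int.mod (t.2.1 * u.2.2 - u.2.1 * t.2.2) (t.1 * u.2.1 - t.2.1 * u.1) = 0 ∧
           PySem.Int.mod (t.1 * u.2.2 - u.1 * t.2.2) (t.1 * u.2.1 - t.2.1 * u.1) = 0 then
          v ++ [(PySem.Int.floordiv (t.2.1 * u.2.2 - u.2.1 * t.2.2) (t.1 * u.2.1 - t.2.1 * u.1),
                 PySem.Int.floordiv (u.1 * t.2.2 - t.1 * u.2.2) (t.1 * u.2.1 - t.2.1 * u.1))]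
        else v) v) []

def solution (line : List (List Int)) : List String :=
  let vertex := PySem.Set.ofList (aVertex line)
  if vertex = [] then []  -- Python: max()/min() of the empty list raise ValueError; excluded by Pre_solution
  else
    let xx := vertex.map Prod.fst
    let yy := vertex.map Prod.snd
    let maxX := (PySem.List.max? xx (fun z => z)).getD 0
    let minX := (PySem.List.min? xx (fun z => z)).getD 0
    let maxY := (PySem.List.max? yy (fun z => z)).getD 0
    let minY := (PySem.List.min? yy (fun z => z)).getD 0
    let answer : List (List String) :=
      List.replicate (maxY - minY + 1).toNat (List.replicate (maxX - minX + 1).toNat ".")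
    if vertex.length = 1 then ["*"]
    else
      let answer2 := vertex.foldl (fun ans p =>
        PySem.List.pySetD ans (p.2 - minY)
          (PySem.List.pySetD (PySem.List.pyGetD ans (p.2 - minY) []) (p.1 - minX) "*")) answer
      let answer3 := answer2.map (fun row => PySem.Str.join "" row)
      (PySem.List.slice? answer3 none none (-1)).getD []

-- ===== PORT B =====
-- B's half-pair loop: j runs over range(i+1, n) only, accumulating into a set
def bPts (line : List (List Int)) : PySem.Set (Int × Int) :=
  let n : Int := line.length
  (PySem.List.pyRange 0 n 1).foldl (fun s i =>
    let t := tri (PySem.List.pyGetD line i [])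
    (PySem.List.pyRange (i + 1) n 1).foldl (fun s j =>
      let u := tri (PySem.List.pyGetD line j [])
      let den := t.1 * u.2.1 - t.2.1 * u.1
      if den = 0 then s
      else
        let px := t.2.1 * u.2.2 - u.2.1 * t.2.2
        let py := u.1 * t.2.2 - t.1 * u.2.2
        if PySem.Int.mod px den = 0 ∧ PySem.Int.mod py den = 0 then
          PySem.Set.add s (PySem.Int.floordiv px den, PySem.Int.floordiv py den)
        else s) s) PySem.Set.empty

-- hand port of Python's '.' * k (exact: a non-positive k gives the empty string)
def dots (k : Int) : String := String.ofList (List.replicate k.toNat '.')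

def solution_alt (line : List (List Int)) : List String :=
  let pts := bPts line
  if pts = [] then []  -- Python: min() of the empty list raises ValueError; excluded by Pre_solution
  else
    let xs := pts.map Prod.fst
    let ys := pts.map Prod.snd
    let minx := (PySem.List.min? xs (fun z => z)).getD 0
    let maxx := (PySem.List.max? xs (fun z => z)).getD 0
    let miny := (PySem.List.min? ys (fun z => z)).getD 0
    let maxy := (PySem.List.max? ys (fun z => z)).getD 0
    if PySem.Set.len pts = 1 then ["*"]
    else
      let rows := pts.foldl (fun d p => d.modify p.2 [] (fun l => l ++ [p.1])) PySem.Dict.empty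
      (PySem.List.pyRange maxy (miny - 1) (-1)).foldl (fun out y =>
        let cols := PySem.List.sorted (rows.getD y []) (fun z => z) false
        let fp := cols.foldl (fun (acc : List String × Int) x =>
          (acc.1 ++ [dots (x - acc.2), "*"], x + 1)) ([], minx)
        out ++ [PySem.Str.join "" (fp.1 ++ [dots (maxx - fp.2 + 1)])]) []

-- ===== PRECONDITION & SPEC =====
-- two length-3 lines with an integer intersection point exist (exact under Pre_, which forces length 3)
def crosses (p q : List Int) : Prop :=
  (tri p).1 * (tri q).2.1 - (tri p).2.1 * (tri q).1 ≠ 0 ∧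
  PySem.Int.mod ((tri p).2.1 * (tri q).2.2 - (tri q).2.1 * (tri p).2.2)
    ((tri p).1 * (tri q).2.1 - (tri p).2.1 * (tri q).1) = 0 ∧
  PySem.Int.mod ((tri p).1 * (tri q).2.2 - (tri q).1 * (tri p).2.2)
    ((tri p).1 * (tri q).2.1 - (tri p).2.1 * (tri q).1) = 0

-- Pre_ excludes exactly the inputs where the Python A raises: a line that is not an (a,b,c) triple
-- (unpacking raises ValueError) or no pair of lines with an integer intersection point
-- (then 'vertex' is empty and max() raises ValueError); B raises there too.
def Pre_solution (line : List (List Int)) : Prop :=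
  (∀ l ∈ line, l.length = 3) ∧
  ∃ i ∈ List.range line.length, ∃ j ∈ List.range line.length,
    i ≠ j ∧ crosses (line.getD i []) (line.getD j [])
instance (line : List (List Int)) : Decidable (Pre_solution line) := by
  unfold Pre_solution crosses; infer_instance

def pvWitness_solution : List (List Int) := [[1, 0, 0], [0, 1, 0]]

def Spec_solution (line : List (List Int)) (out : List String) : Prop := out = solution_alt line
instance (line : List (List Int)) (out : List String) : Decidable (Spec_solution line out) := by
  unfold Spec_solution; infer_instance

-- ===== CLAIM (what is proved, stated in full; the proofs are below) =====
def Claim_equal_solution : Prop :=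
  ∀ (line : List (List Int)), Dom_solution line → Pre_solution line → Spec_solution line (solution line)

-- ===== LEMMAS AND PROOFS =====

-- the intersection condition and value for the pair (i, j), shared characterisation of both loops
def condB (line : List (List Int)) (i j : Int) : Prop :=
  let t := tri (PySem.List.pyGetD line i [])
  let u := tri (PySem.List.pyGetD line j [])
  t.1 * u.2.1 - t.2.1 * u.1 ≠ 0 ∧
  PySem.Int.mod (t.2.1 * u.2.2 - u.2.1 * t.2.2) (t.1 * u.2.1 - t.2.1 * u.1) = 0 ∧
  PySem.Int.mod (u.1 * t.2.2 - t.1 * u.2.2) (t.1 * u.2.1 - t.2.1 * u.1) = 0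

def pcond (line : List (List Int)) (i j : Int) : Prop := i ≠ j ∧ condB line i j

def pval (line : List (List Int)) (i j : Int) : Int × Int :=
  let t := tri (PySem.List.pyGetD line i [])
  let u := tri (PySem.List.pyGetD line j [])
  (PySem.Int.floordiv (t.2.1 * u.2.2 - u.2.1 * t.2.2) (t.1 * u.2.1 - t.2.1 * u.1),
   PySem.Int.floordiv (u.1 * t.2.2 - t.1 * u.2.2) (t.1 * u.2.1 - t.2.1 * u.1))

-- what one inner-loop step of A contributes, as a list
def gIn (line : List (List Int)) (i j : Int) : List (Int × Int) :=
  let t := tri (PySem.List.pyGetD line i [])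
  let u := tri (PySem.List.pyGetD line j [])
  if t.1 * u.2.1 = t.2.1 * u.1 ∨ i = j then []
  else
    if PySem.Int.mod (t.2.1 * u.2.2 - u.2.1 * t.2.2) (t.1 * u.2.1 - t.2.1 * u.1) = 0 ∧
       PySem.Int.mod (t.1 * u.2.2 - u.1 * t.2.2) (t.1 * u.2.1 - t.2.1 * u.1) = 0 then
      [pval line i j]
    else []

theorem mem_gIn (line : List (List Int)) (i j : Int) (x : Int × Int) :
    x ∈ gIn line i j ↔ pcond line i j ∧ x = pval line i j := by
  simp only [gIn, pcond, condB]
  split_ifs with h1 h2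
  · simp only [List.not_mem_nil, false_iff]
    rintro ⟨⟨hij, hden, -, -⟩, -⟩
    rcases h1 with h1 | h1
    · exact hden (by omega)
    · exact hij h1
  · simp only [List.mem_singleton]
    push_neg at h1
    obtain ⟨h2a, h2b⟩ := h2
    rw [PySem.Int.mod_eq_zero_iff_dvd] at h2b
    constructor
    · intro hx
      exact ⟨⟨fun h => h1.2 h, fun h => h1.1 (by omega), h2a,
        by rw [PySem.Int.mod_eq_zero_iff_dvd]; exact dvd_sub_comm.mp h2b⟩, hx⟩
    · exact fun h => h.2
  · simp only [List.not_mem_nil, false_iff]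
    rintro ⟨⟨-, -, hm1, hm2⟩, -⟩
    rw [PySem.Int.mod_eq_zero_iff_dvd] at hm2
    exact h2 ⟨hm1, by rw [PySem.Int.mod_eq_zero_iff_dvd]; exact dvd_sub_comm.mp hm2⟩

theorem mem_aVertex (line : List (List Int)) (x : Int × Int) :
    x ∈ aVertex line ↔
      ∃ i ∈ PySem.List.pyRange 0 (line.length : Int) 1,
        ∃ j ∈ PySem.List.pyRange 0 (line.length : Int) 1, pcond line i j ∧ x = pval line i j := by
  have hg : ∀ (i : Int) (v : List (Int × Int)),
      (PySem.List.pyRange 0 (line.length : Int) 1).foldl (fun v j =>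
        let u := tri (PySem.List.pyGetD line j [])
        let t := tri (PySem.List.pyGetD line i [])
        if t.1 * u.2.1 = t.2.1 * u.1 ∨ i = j then v
        else
          if PySem.Int.mod (t.2.1 * u.2.2 - u.2.1 * t.2.2) (t.1 * u.2.1 - t.2.1 * u.1) = 0 ∧
             PySem.Int.mod (t.1 * u.2.2 - u.1 * t.2.2) (t.1 * u.2.1 - t.2.1 * u.1) = 0 then
            v ++ [(PySem.Int.floordiv (t.2.1 * u.2.2 - u.2.1 * t.2.2) (t.1 * u.2.1 - t.2.1 * u.1),
                   PySem.Int.floordiv (u.1 * t.2.2 - t.1 * u.2.2) (t.1 * u.2.1 - t.2.1 * u.1))]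
          else v) v
      = v ++ (PySem.List.pyRange 0 (line.length : Int) 1).flatMap (fun j => gIn line i j) := by
    intro i v
    rw [List.foldl_ext _ (fun v j => v ++ gIn line i j)]
    · exact PySem.List.foldl_append_eq_flatMap _ _ _
    · intro v j _
      simp only [gIn, pval]
      split_ifs <;> simp
  unfold aVertex
  simp only [hg]
  rw [show (fun (v : List (Int × Int)) (i : Int) =>
        v ++ (PySem.List.pyRange 0 (line.length : Int) 1).flatMap (fun j => gIn line i j))
      = fun v i => v ++ (fun i => (PySem.List.pyRange 0 (line.length : Int) 1).flatMap
          (fun j => gIn line i j)) i from rfl,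
    PySem.List.foldl_append_eq_flatMap]
  simp only [List.nil_append, List.mem_flatMap, mem_gIn]

theorem mem_foldl_grow {β : Type} (F : PySem.Set (Int × Int) → β → PySem.Set (Int × Int))
    (Q : β → Int × Int → Prop) (hF : ∀ s b x, x ∈ F s b ↔ x ∈ s ∨ Q b x) :
    ∀ (l : List β) (s : PySem.Set (Int × Int)) (x : Int × Int),
      x ∈ l.foldl F s ↔ x ∈ s ∨ ∃ b ∈ l, Q b x := by
  intro l
  induction l with
  | nil => simp
  | cons b l ih =>
    intro s x
    rw [List.foldl_cons, ih, hF]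
    simp only [List.mem_cons]
    constructor
    · rintro (⟨h | h⟩ | ⟨b', hb', h⟩)
      · exact Or.inl h
      · exact Or.inr ⟨b, Or.inl rfl, h⟩
      · exact Or.inr ⟨b', Or.inr hb', h⟩
    · rintro (h | ⟨b', hb' | hb', h⟩)
      · exact Or.inl (Or.inl h)
      · exact Or.inl (Or.inr (hb' ▸ h))
      · exact Or.inr ⟨b', hb', h⟩

theorem nodup_foldl_grow {β : Type} (F : PySem.Set (Int × Int) → β → PySem.Set (Int × Int))
    (hF : ∀ s b, s.Nodup → (F s b).Nodup) :
    ∀ (l : List β) (s : PySem.Set (Int × Int)), s.Nodup → (l.foldl F s).Nodup := by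
  intro l
  induction l with
  | nil => intro s hs; exact hs
  | cons b l ih => intro s hs; exact ih _ (hF s b hs)

-- one inner-loop step of B, characterised
theorem bInner_mem (line : List (List Int)) (i : Int) (s : PySem.Set (Int × Int)) (j : Int)
    (x : Int × Int) :
    x ∈ (fun (s : PySem.Set (Int × Int)) (j : Int) =>
      let u := tri (PySem.List.pyGetD line j [])
      let t := tri (PySem.List.pyGetD line i [])
      let den := t.1 * u.2.1 - t.2.1 * u.1
      if den = 0 then s
      else
        let px := t.2.1 * u.2.2 - u.2.1 * t.2.2
        let py := u.1 * t.2.2 - t.1 * u.2.2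
        if PySem.Int.mod px den = 0 ∧ PySem.Int.mod py den = 0 then
          PySem.Set.add s (PySem.Int.floordiv px den, PySem.Int.floordiv py den)
        else s) s j
      ↔ x ∈ s ∨ (condB line i j ∧ x = pval line i j) := by
  simp only [condB, pval]
  split_ifs with h1 h2
  · simp_all
  · rw [PySem.Set.mem_add]
    constructor
    · rintro (h | h)
      · exact Or.inl h
      · exact Or.inr ⟨⟨h1, h2.1, h2.2⟩, h⟩
    · rintro (h | ⟨-, h⟩)
      · exact Or.inl h
      · exact Or.inr h
  · constructor
    · exact fun h => Or.inl h
    · rintro (h | ⟨⟨-, hc⟩, -⟩)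
      · exact h
      · exact absurd ⟨hc.1, hc.2⟩ h2

theorem mem_bPts_raw (line : List (List Int)) (x : Int × Int) :
    x ∈ bPts line ↔
      ∃ i ∈ PySem.List.pyRange 0 (line.length : Int) 1,
        ∃ j ∈ PySem.List.pyRange (i + 1) (line.length : Int) 1,
          condB line i j ∧ x = pval line i j := by
  unfold bPts
  rw [mem_foldl_grow _ (fun i x => ∃ j ∈ PySem.List.pyRange (i + 1) (line.length : Int) 1,
        condB line i j ∧ x = pval line i j) ?_ _ _ x]
  · simp [PySem.Set.empty]
  · intro s i y
    exact mem_foldl_grow _ (fun j y => condB line i j ∧ y = pval line i j)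
      (fun s j z => bInner_mem line i s j z) _ s y

theorem nodup_bPts (line : List (List Int)) : (bPts line).Nodup := by
  unfold bPts
  refine nodup_foldl_grow _ ?_ _ _ (by simp [PySem.Set.empty])
  intro s i hs
  refine nodup_foldl_grow _ ?_ _ _ hs
  intro s' j hs'
  dsimp only
  split_ifs with h1 h2
  · exact hs'
  · exact PySem.Set.nodup_add _ _ hs'
  · exact hs'

-- swapping the two lines negates denominator and both numerators, so the pair (j,i)
-- satisfies the same condition and yields the same point
theorem condB_symm (line : List (List Int)) (i j : Int) (h : condB line i j) :
    condB line j i ∧ pval line j i = pval line i j := by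
  simp only [condB, pval] at *
  set t := tri (PySem.List.pyGetD line i []) with ht
  set u := tri (PySem.List.pyGetD line j []) with hu
  obtain ⟨hden, h1, h2⟩ := h
  have e0 : u.1 * t.2.1 - u.2.1 * t.1 = -(t.1 * u.2.1 - t.2.1 * u.1) := by ring
  have e1 : u.2.1 * t.2.2 - t.2.1 * u.2.2 = -(t.2.1 * u.2.2 - u.2.1 * t.2.2) := by ring
  have e2 : t.1 * u.2.2 - u.1 * t.2.2 = -(u.1 * t.2.2 - t.1 * u.2.2) := by ring
  refine ⟨⟨by omega, ?_, ?_⟩, ?_⟩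
  · rw [e0, e1, PySem.Int.mod_neg_neg, h1, neg_zero]
  · rw [e0, e2, PySem.Int.mod_neg_neg, h2, neg_zero]
  · rw [e0, e1, e2, PySem.Int.floordiv_neg_neg, PySem.Int.floordiv_neg_neg]

theorem mem_bPts (line : List (List Int)) (x : Int × Int) :
    x ∈ bPts line ↔ x ∈ PySem.Set.ofList (aVertex line) := by
  rw [PySem.Set.mem_ofList, mem_bPts_raw, mem_aVertex]
  constructor
  · rintro ⟨i, hi, j, hj, hc, hx⟩
    rw [PySem.List.mem_pyRange_one] at hi hj
    refine ⟨i, ?_, j, ?_, ⟨by omega, hc⟩, hx⟩ <;> rw [PySem.List.mem_pyRange_one] <;> omega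
  · rintro ⟨i, hi, j, hj, ⟨hij, hc⟩, hx⟩
    rw [PySem.List.mem_pyRange_one] at hi hj
    rcases lt_or_gt_of_ne hij with hlt | hgt
    · refine ⟨i, ?_, j, ?_, hc, hx⟩ <;> rw [PySem.List.mem_pyRange_one] <;> omega
    · obtain ⟨hc', hv⟩ := condB_symm line i j hc
      refine ⟨j, ?_, i, ?_, hc', by rw [hv]; exact hx⟩ <;>
        rw [PySem.List.mem_pyRange_one] <;> omega

theorem perm_vertex_pts (line : List (List Int)) :
    (PySem.Set.ofList (aVertex line)).Perm (bPts line) := by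
  refine (List.perm_ext_iff_of_nodup (PySem.Set.nodup_ofList _) (nodup_bPts line)).mpr ?_
  intro a
  rw [mem_bPts]

theorem extremum_max (l1 l2 : List Int) (h : l1.Perm l2) :
    (PySem.List.max? l1 (fun z => z)).getD 0 = (PySem.List.max? l2 (fun z => z)).getD 0 := by
  cases h1 : PySem.List.max? l1 (fun z => z) with
  | none =>
    rw [PySem.List.max?_eq_none_iff] at h1
    subst h1
    rw [(PySem.List.max?_eq_none_iff l2 _).mpr h.symm.eq_nil]
  | some m1 =>
    cases h2 : PySem.List.max? l2 (fun z => z) with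
    | none =>
      rw [PySem.List.max?_eq_none_iff] at h2
      subst h2
      rw [h.eq_nil] at h1
      simp [PySem.List.max?] at h1
    | some m2 =>
      simp only [Option.getD_some]
      exact le_antisymm
        (PySem.List.max?_isMax h2 m1 (h.mem_iff.mp (PySem.List.max?_mem h1)))
        (PySem.List.max?_isMax h1 m2 (h.mem_iff.mpr (PySem.List.max?_mem h2)))

theorem extremum_min (l1 l2 : List Int) (h : l1.Perm l2) :
    (PySem.List.min? l1 (fun z => z)).getD 0 = (PySem.List.min? l2 (fun z => z)).getD 0 := by
  cases h1 : PySem.List.min? l1 (fun z => z) with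
  | none =>
    rw [PySem.List.min?_eq_none_iff] at h1
    subst h1
    rw [(PySem.List.min?_eq_none_iff l2 _).mpr h.symm.eq_nil]
  | some m1 =>
    cases h2 : PySem.List.min? l2 (fun z => z) with
    | none =>
      rw [PySem.List.min?_eq_none_iff] at h2
      subst h2
      rw [h.eq_nil] at h1
      simp [PySem.List.min?] at h1
    | some m2 =>
      simp only [Option.getD_some]
      exact le_antisymm
        (PySem.List.min?_isMin h1 m2 (h.mem_iff.mpr (PySem.List.min?_mem h2)))
        (PySem.List.min?_isMin h2 m1 (h.mem_iff.mp (PySem.List.min?_mem h1)))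

-- one scatter-write of A's drawing loop
def updG (minX minY : Int) (ans : List (List String)) (p : Int × Int) : List (List String) :=
  PySem.List.pySetD ans (p.2 - minY)
    (PySem.List.pySetD (PySem.List.pyGetD ans (p.2 - minY) []) (p.1 - minX) "*")

-- the scatter loop of A, named for the proofs (definitionally the foldl in 'solution')
def scat (minX minY : Int) (vs : List (Int × Int)) (g : List (List String)) : List (List String) :=
  vs.foldl (updG minX minY) g

def gridGet (g : List (List String)) (r c : Nat) : String := (g.getD r []).getD c "."

-- the in-range condition on a point p for a grid g
def inG (minX minY : Int) (g : List (List String)) (p : Int × Int) : Prop :=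
  0 ≤ p.2 - minY ∧ (p.2 - minY).toNat < g.length ∧ 0 ≤ p.1 - minX ∧
    (p.1 - minX).toNat < (g.getD (p.2 - minY).toNat []).length

theorem updG_length (minX minY : Int) (g : List (List String)) (p : Int × Int) :
    (updG minX minY g p).length = g.length := by
  simp [updG, PySem.List.length_pySetD]

theorem updG_rowlen (minX minY : Int) (g : List (List String)) (p : Int × Int)
    (hy : 0 ≤ p.2 - minY) (r : Nat) :
    ((updG minX minY g p).getD r []).length = (g.getD r []).length := by
  simp only [updG, PySem.List.pySetD_of_nonneg _ _ hy]
  by_cases hk : (p.2 - minY).toNat < g.length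
  · by_cases hr : r = (p.2 - minY).toNat
    · subst hr
      rw [List.getD_eq_getElem _ _ (by simpa using hk), List.getElem_set_self,
        PySem.List.length_pySetD, PySem.List.pyGetD_eq_getElem _ _ hy (by omega),
        List.getD_eq_getElem _ _ hk]
    · rw [List.getD_eq_getElem?_getD, List.getD_eq_getElem?_getD (l := g),
        List.getElem?_set, if_neg (fun h => hr h.symm)]
  · rw [List.set_eq_of_length_le (by omega)]

theorem updG_get (minX minY : Int) (g : List (List String)) (p : Int × Int)
    (hp : inG minX minY g p) (r c : Nat) :
    gridGet (updG minX minY g p) r c =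
      if (p.2 - minY).toNat = r ∧ (p.1 - minX).toNat = c then "*" else gridGet g r c := by
  obtain ⟨hy, hk, hx, hc⟩ := hp
  have hky : p.2 - minY < (g.length : Int) := by omega
  rw [List.getD_eq_getElem _ _ hk] at hc
  simp only [updG, gridGet, List.getD_eq_getElem?_getD]
  rw [PySem.List.pySetD_of_nonneg _ _ hy, PySem.List.pyGetD_eq_getElem _ _ hy hky,
    PySem.List.pySetD_of_nonneg _ _ hx]
  rw [List.getElem?_set]
  by_cases hr : (p.2 - minY).toNat = r
  · rw [if_pos hr, if_pos (by omega), Option.getD_some, List.getElem?_set]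
    rw [← hr, List.getElem?_eq_getElem hk, Option.getD_some]
    by_cases hcc : (p.1 - minX).toNat = c
    · rw [if_pos hcc, if_pos (by omega), if_pos ⟨rfl, hcc⟩, Option.getD_some]
    · rw [if_neg hcc, if_neg (fun h => hcc h.2)]
  · rw [if_neg hr, if_neg (fun h => hr h.1)]

theorem scat_length (minX minY : Int) (vs : List (Int × Int)) (g : List (List String)) :
    (scat minX minY vs g).length = g.length := by
  induction vs generalizing g with
  | nil => rfl
  | cons p vs ih => rw [scat, List.foldl_cons, ← scat, ih, updG_length]

theorem scat_rowlen (minX minY : Int) (vs : List (Int × Int)) (g : List (List String))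
    (hb : ∀ p ∈ vs, 0 ≤ p.2 - minY) (r : Nat) :
    ((scat minX minY vs g).getD r []).length = (g.getD r []).length := by
  induction vs generalizing g with
  | nil => rfl
  | cons p vs ih =>
    rw [scat, List.foldl_cons, ← scat, ih _ (fun q hq => hb q (List.mem_cons_of_mem _ hq)),
      updG_rowlen _ _ _ _ (hb p List.mem_cons_self)]

theorem scat_get (minX minY : Int) (vs : List (Int × Int)) (g : List (List String))
    (hb : ∀ p ∈ vs, inG minX minY g p) (r c : Nat) :
    gridGet (scat minX minY vs g) r c =
      if ∃ p ∈ vs, (p.2 - minY).toNat = r ∧ (p.1 - minX).toNat = c then "*"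
      else gridGet g r c := by
  induction vs generalizing g with
  | nil => simp [scat]
  | cons p vs ih =>
    have hp := hb p List.mem_cons_self
    have hb' : ∀ q ∈ vs, inG minX minY (updG minX minY g p) q := by
      intro q hq
      obtain ⟨h1, h2, h3, h4⟩ := hb q (List.mem_cons_of_mem _ hq)
      exact ⟨h1, by rwa [updG_length], h3,
        by rwa [updG_rowlen _ _ _ _ hp.1]⟩
    rw [scat, List.foldl_cons, ← scat, ih _ hb', updG_get _ _ _ _ hp r c]
    by_cases hex : ∃ q ∈ vs, (q.2 - minY).toNat = r ∧ (q.1 - minX).toNat = c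
    · obtain ⟨q, hq, hqrc⟩ := hex
      rw [if_pos ⟨q, hq, hqrc⟩, if_pos ⟨q, List.mem_cons_of_mem _ hq, hqrc⟩]
    · rw [if_neg hex]
      by_cases hph : (p.2 - minY).toNat = r ∧ (p.1 - minX).toNat = c
      · rw [if_pos hph, if_pos ⟨p, List.mem_cons_self, hph⟩]
      · rw [if_neg hph, if_neg ?_]
        rintro ⟨q, hq, hqrc⟩
        rcases List.mem_cons.mp hq with h | h
        · exact hph (h ▸ hqrc)
        · exact hex ⟨q, h, hqrc⟩

theorem scat_row (minX minY maxX maxY : Int) (vs : List (Int × Int))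
    (hbx : ∀ p ∈ vs, minX ≤ p.1 ∧ p.1 ≤ maxX) (hby : ∀ p ∈ vs, minY ≤ p.2 ∧ p.2 ≤ maxY)
    (r : Nat) (hr : r < (maxY - minY + 1).toNat) :
    (scat minX minY vs
        (List.replicate (maxY - minY + 1).toNat
          (List.replicate (maxX - minX + 1).toNat "."))).getD r [] =
      (List.range (maxX - minX + 1).toNat).map (fun c =>
        if ∃ p ∈ vs, (p.2 - minY).toNat = r ∧ (p.1 - minX).toNat = c then "*" else ".") := by
  set H := (maxY - minY + 1).toNat with hH
  set W := (maxX - minX + 1).toNat with hW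
  set g0 : List (List String) := List.replicate H (List.replicate W ".") with hg0
  have hg0len : g0.length = H := List.length_replicate
  have hrow : ∀ r' : Nat, r' < H → g0.getD r' [] = List.replicate W "." := by
    intro r' hr'
    rw [hg0, List.getD_replicate _ hr']
  have hb : ∀ p ∈ vs, inG minX minY g0 p := by
    intro p hp
    obtain ⟨h3, h4⟩ := hbx p hp
    obtain ⟨h1, h2⟩ := hby p hp
    refine ⟨by omega, by rw [hg0len]; omega, by omega, ?_⟩
    rw [hrow _ (by omega), List.length_replicate]
    omega
  have hlen : ((scat minX minY vs g0).getD r []).length = W := by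
    rw [scat_rowlen minX minY vs g0 (fun p hp => (hb p hp).1) r, hrow _ hr,
      List.length_replicate]
  apply List.ext_getElem
  · rw [hlen, List.length_map, List.length_range]
  · intro c hc1 hc2
    rw [List.getElem_map, List.getElem_range,
      ← List.getD_eq_getElem ((scat minX minY vs g0).getD r []) "." hc1]
    have := scat_get minX minY vs g0 hb r c
    rw [gridGet] at this
    rw [this, gridGet, hrow _ hr, List.getD_replicate]
    rw [hlen] at hc1
    exact hc1

theorem render_eq (vs pts : List (Int × Int)) (hmm : ∀ x, x ∈ vs ↔ x ∈ pts)
    (minX maxX minY maxY : Int)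
    (hminX : ∀ p ∈ vs, minX ≤ p.1) (hmaxX : ∀ p ∈ vs, p.1 ≤ maxX)
    (hminY : ∀ p ∈ vs, minY ≤ p.2) (hmaxY : ∀ p ∈ vs, p.2 ≤ maxY)
    (hx : minX ≤ maxX) (hy : minY ≤ maxY) :
    ((scat minX minY vs
        (List.replicate (maxY - minY + 1).toNat (List.replicate (maxX - minX + 1).toNat "."))).map
      (fun row => PySem.Str.join "" row)).reverse =
    (PySem.List.pyRange maxY (minY - 1) (-1)).map (fun y =>
      PySem.Str.join "" ((PySem.List.pyRange minX (maxX + 1) 1).map (fun x =>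
        if PySem.Set.contains pts (x, y) then "*" else "."))) := by
  set H := (maxY - minY + 1).toNat with hH
  set W := (maxX - minX + 1).toNat with hW
  set g0 : List (List String) := List.replicate H (List.replicate W ".") with hg0
  have hg0len : g0.length = H := List.length_replicate
  rw [PySem.List.pyRange_neg_one, List.map_map]
  apply List.ext_getElem
  · simp only [List.length_reverse, List.length_map, scat_length, hg0len, List.length_range]
    omega
  · intro n h1 h2
    simp only [List.length_reverse, List.length_map, scat_length, hg0len] at h1
    rw [List.getElem_reverse, List.getElem_map, List.getElem_map, List.getElem_range]
    simp only [List.length_map, scat_length, hg0len, Function.comp]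
    congr 1
    have hrowc := scat_row minX minY maxX maxY vs
      (fun p hp => ⟨hminX p hp, hmaxX p hp⟩) (fun p hp => ⟨hminY p hp, hmaxY p hp⟩)
      (H - 1 - n) (by omega)
    rw [List.getD_eq_getElem _ [] (by rw [scat_length, hg0len]; omega)] at hrowc
    rw [hrowc, PySem.List.pyRange_one, List.map_map]
    rw [show (maxX + 1 - minX).toNat = W from by omega]
    apply List.map_congr_left
    intro c hc
    rw [List.mem_range] at hc
    simp only [Function.comp]
    have hcond : (∃ p ∈ vs, (p.2 - minY).toNat = H - 1 - n ∧ (p.1 - minX).toNat = c) ↔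
        (minX + (c : Int), maxY - (n : Int)) ∈ pts := by
      rw [← hmm]
      constructor
      · rintro ⟨p, hp, hpr, hpc⟩
        have b1 := hminY p hp
        have b2 := hmaxY p hp
        have b3 := hminX p hp
        have hpe : p = (minX + (c : Int), maxY - (n : Int)) := by
          obtain ⟨px, py⟩ := p
          simp only at hpr hpc b1 b2 b3 ⊢
          rw [Prod.mk.injEq]
          constructor <;> omega
        exact hpe ▸ hp
      · intro hp
        refine ⟨_, hp, ?_, ?_⟩ <;> simp only <;> omega
    by_cases hmem : (minX + (c : Int), maxY - (n : Int)) ∈ pts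
    · rw [if_pos (hcond.mpr hmem), if_pos (by simpa [PySem.Set.contains_iff])]
    · rw [if_neg (fun h => hmem (hcond.mp h)), if_neg (by simpa [PySem.Set.contains_iff])]

theorem max?_getD_bound (l : List Int) (hl : l ≠ []) :
    ∀ y ∈ l, y ≤ (PySem.List.max? l (fun z => z)).getD 0 := by
  cases hm : PySem.List.max? l (fun z => z) with
  | none => exact absurd ((PySem.List.max?_eq_none_iff l _).mp hm) hl
  | some m => simpa using PySem.List.max?_isMax hm

theorem min?_getD_bound (l : List Int) (hl : l ≠ []) :
    ∀ y ∈ l, (PySem.List.min? l (fun z => z)).getD 0 ≤ y := by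
  cases hm : PySem.List.min? l (fun z => z) with
  | none => exact absurd ((PySem.List.min?_eq_none_iff l _).mp hm) hl
  | some m => simpa using PySem.List.min?_isMin hm

-- ==== B-side rendering lemmas ====

theorem joinflat : ∀ (L : List (List Char)), PySem.Chars.join [] L = L.flatten := by
  intro L
  induction L with
  | nil => rfl
  | cons a l ih =>
    cases l with
    | nil => simp [PySem.Chars.join, List.intercalate]
    | cons b m => rw [PySem.Chars.join_cons_cons] at *; simp_all

theorem toList_join_empty (L : List String) :
    (PySem.Str.join "" L).toList = (L.map String.toList).flatten := by
  rw [PySem.Str.toList_join]; exact joinflat _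

theorem flatten_singletons {α β : Type} (l : List α) (f : α → β) :
    (l.map (fun x => [f x])).flatten = l.map f := by induction l <;> simp_all

-- a loop that only appends one element per step is a map
theorem foldl_snoc {α β : Type} (l : List α) (g : α → β) (acc : List β) :
    l.foldl (fun acc y => acc ++ [g y]) acc = acc ++ l.map g := by
  induction l generalizing acc with
  | nil => simp
  | cons a t ih => simp [ih]

-- the dict built by B's grouping loop, characterised per key
theorem rows_getD (pts : List (Int × Int)) (y : Int) :
    ((pts.foldl (fun (d : PySem.Dict Int (List Int)) p => d.modify p.2 [] (fun l => l ++ [p.1]))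
        PySem.Dict.empty).getD y []) = (pts.filter (fun p => p.2 == y)).map Prod.fst := by
  have h1 : pts.foldl (fun (d : PySem.Dict Int (List Int)) p => d.modify p.2 [] (fun l => l ++ [p.1]))
        PySem.Dict.empty
      = (pts.map Prod.swap).foldl (fun d q => d.modify q.1 [] (fun l => l ++ [q.2]))
        PySem.Dict.empty := by
    rw [List.foldl_map]
    rfl
  rw [h1, PySem.Dict.getD_foldl_modify_append, PySem.Dict.getD_empty, List.nil_append,
    List.filter_map, List.map_map]
  congr 1

-- gap-fill characterisation: the chars produced by B's parts loop
def gapPre : Int → List Int → List Char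
  | _, [] => []
  | prev, x :: r => List.replicate (x - prev).toNat '.' ++ '*' :: gapPre (x + 1) r

def finPrev : Int → List Int → Int
  | prev, [] => prev
  | _, x :: r => finPrev (x + 1) r

theorem gap_foldl_snd (cols : List Int) (acc : List String) (prev : Int) :
    (cols.foldl (fun (a : List String × Int) x => (a.1 ++ [dots (x - a.2), "*"], x + 1))
      (acc, prev)).2 = finPrev prev cols := by
  induction cols generalizing acc prev with
  | nil => rfl
  | cons x r ih => simpa [finPrev] using ih _ (x + 1)

theorem gap_foldl_fst (cols : List Int) (acc : List String) (prev : Int) :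
    (((cols.foldl (fun (a : List String × Int) x => (a.1 ++ [dots (x - a.2), "*"], x + 1))
      (acc, prev)).1).map String.toList).flatten
    = ((acc.map String.toList).flatten) ++ gapPre prev cols := by
  induction cols generalizing acc prev with
  | nil => simp [gapPre]
  | cons x r ih =>
    rw [List.foldl_cons]
    have := ih (acc ++ [dots (x - prev), "*"]) (x + 1)
    simp only [List.map_append, List.flatten_append] at this
    rw [this]
    simp [gapPre, dots]

-- the gap-filled row equals the per-cell indicator row
theorem gapPre_eq (cols : List Int) (prev maxx : Int)
    (hs : cols.Pairwise (· < ·)) (hb : ∀ x ∈ cols, prev ≤ x ∧ x ≤ maxx) :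
    gapPre prev cols ++ List.replicate (maxx - finPrev prev cols + 1).toNat '.'
      = (PySem.List.pyRange prev (maxx + 1) 1).map (fun x => if x ∈ cols then '*' else '.') := by
  induction cols generalizing prev with
  | nil =>
    simp only [gapPre, finPrev, List.nil_append]
    rw [PySem.List.pyRange_one, List.map_map]
    rw [show ((fun x => if x ∈ ([] : List Int) then '*' else '.') ∘ fun k : Nat => prev + (k : Int))
        = fun _ : Nat => '.' from by funext k; simp]
    rw [List.map_const', List.length_range]
    congr 1
    omega
  | cons x r ih =>
    obtain ⟨hpx, hxm⟩ := hb x List.mem_cons_self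
    have hr : ∀ z ∈ r, x + 1 ≤ z ∧ z ≤ maxx := by
      intro z hz
      exact ⟨by have := (List.pairwise_cons.mp hs).1 z hz; omega,
        (hb z (List.mem_cons_of_mem _ hz)).2⟩
    have hsplit : PySem.List.pyRange prev (maxx + 1) 1
        = PySem.List.pyRange prev x 1 ++ x :: PySem.List.pyRange (x + 1) (maxx + 1) 1 := by
      rw [PySem.List.pyRange_one_append prev x (maxx + 1) (by omega) (by omega),
        PySem.List.pyRange_one_cons (show x < maxx + 1 by omega)]
    rw [hsplit, List.map_append, List.map_cons]
    have hfirst : (PySem.List.pyRange prev x 1).map (fun z => if z ∈ x :: r then '*' else '.')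
        = List.replicate (x - prev).toNat '.' := by
      have h0 : ∀ z ∈ PySem.List.pyRange prev x 1, (if z ∈ x :: r then '*' else '.') = '.' := by
        intro z hz
        rw [PySem.List.mem_pyRange_one] at hz
        rw [if_neg]
        intro hmem
        rcases List.mem_cons.mp hmem with h | h
        · omega
        · have := (hr z h).1; omega
      rw [List.map_congr_left h0, List.map_const', PySem.List.length_pyRange_one]
    have htail : (PySem.List.pyRange (x + 1) (maxx + 1) 1).map
          (fun z => if z ∈ x :: r then '*' else '.')
        = (PySem.List.pyRange (x + 1) (maxx + 1) 1).map (fun z => if z ∈ r then '*' else '.') := by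
      apply List.map_congr_left
      intro z hz
      rw [PySem.List.mem_pyRange_one] at hz
      by_cases hmem : z ∈ r
      · rw [if_pos (List.mem_cons_of_mem _ hmem), if_pos hmem]
      · rw [if_neg, if_neg hmem]
        intro h
        rcases List.mem_cons.mp h with h | h
        · omega
        · exact hmem h
    rw [hfirst, htail, ← ih (x + 1) (List.pairwise_cons.mp hs).2 hr]
    simp [gapPre, finPrev, List.append_assoc]

-- membership of a column in the sorted per-row list ↔ the point is in the set
theorem mem_rowcols (pts : List (Int × Int)) (y x : Int) :
    (x ∈ PySem.List.sorted ((pts.filter (fun p => p.2 == y)).map Prod.fst) (fun z => z) false)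
      ↔ (x, y) ∈ pts := by
  rw [PySem.List.mem_sorted, List.mem_map]
  constructor
  · rintro ⟨p, hp, hx⟩
    rw [List.mem_filter] at hp
    have : p = (x, y) := by
      obtain ⟨px, py⟩ := p
      have := beq_iff_eq.mp hp.2
      simp only at hx this
      rw [Prod.mk.injEq]
      exact ⟨hx, this⟩
    exact this ▸ hp.1
  · intro h
    exact ⟨(x, y), List.mem_filter.mpr ⟨h, beq_iff_eq.mpr rfl⟩, rfl⟩

theorem rowcols_sorted_lt (pts : List (Int × Int)) (hnd : pts.Nodup) (y : Int) :
    (PySem.List.sorted ((pts.filter (fun p => p.2 == y)).map Prod.fst) (fun z => z) false).Pairwise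
      (· < ·) := by
  have hrownd : ((pts.filter (fun p => p.2 == y)).map Prod.fst).Nodup := by
    refine (List.Nodup.filter _ hnd).map_on ?_
    intro a ha b hb hab
    rw [List.mem_filter] at ha hb
    obtain ⟨a1, a2⟩ := a
    obtain ⟨b1, b2⟩ := b
    have ea := beq_iff_eq.mp ha.2
    have eb := beq_iff_eq.mp hb.2
    simp only at ea eb hab
    rw [Prod.mk.injEq]
    exact ⟨hab, ea.trans eb.symm⟩
  have hle := PySem.List.sorted_pairwise ((pts.filter (fun p => p.2 == y)).map Prod.fst)
    (fun z => z)
  have hnd2 : (PySem.List.sorted ((pts.filter (fun p => p.2 == y)).map Prod.fst)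
      (fun z => z) false).Nodup :=
    (PySem.List.sorted_perm _ _ _).nodup_iff.mpr hrownd
  have := List.Pairwise.and hle hnd2
  exact this.imp (fun h => lt_of_le_of_ne h.1 h.2)

-- B's gap-fill row for one y equals the canonical per-cell row
theorem gaprow_eq (pts : List (Int × Int)) (cols : List Int) (minx maxx y : Int)
    (hmem : ∀ x, x ∈ cols ↔ (x, y) ∈ pts) (hlt : cols.Pairwise (· < ·))
    (hminx : ∀ p ∈ pts, minx ≤ p.1) (hmaxx : ∀ p ∈ pts, p.1 ≤ maxx) :
    PySem.Str.join "" ((cols.foldl (fun (acc : List String × Int) x =>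
        (acc.1 ++ [dots (x - acc.2), "*"], x + 1)) ([], minx)).1
      ++ [dots (maxx - (cols.foldl (fun (acc : List String × Int) x =>
        (acc.1 ++ [dots (x - acc.2), "*"], x + 1)) ([], minx)).2 + 1)])
    = PySem.Str.join "" ((PySem.List.pyRange minx (maxx + 1) 1).map (fun x =>
        if PySem.Set.contains pts (x, y) then "*" else ".")) := by
  have hbnd : ∀ x ∈ cols, minx ≤ x ∧ x ≤ maxx := fun x hx =>
    ⟨hminx _ ((hmem x).mp hx), hmaxx _ ((hmem x).mp hx)⟩
  apply String.toList_inj.mp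
  rw [toList_join_empty, toList_join_empty]
  rw [List.map_append, List.flatten_append, gap_foldl_fst, gap_foldl_snd]
  have hd : (([dots (maxx - finPrev minx cols + 1)].map String.toList)).flatten
      = List.replicate (maxx - finPrev minx cols + 1).toNat '.' := by simp [dots]
  rw [hd]
  simp only [List.map_nil, List.flatten_nil, List.nil_append]
  rw [gapPre_eq cols minx maxx hlt hbnd, List.map_map]
  rw [show (String.toList ∘ fun x => if PySem.Set.contains pts (x, y) then "*" else ".")
      = fun x => [if x ∈ cols then '*' else '.'] from ?_]
  · rw [flatten_singletons]
  · funext x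
    by_cases h : (x, y) ∈ pts
    · rw [Function.comp_apply, if_pos (by simpa [PySem.Set.contains_iff]),
        if_pos ((hmem x).mpr h)]
      rfl
    · rw [Function.comp_apply, if_neg (by simpa [PySem.Set.contains_iff]),
        if_neg (fun hc => h ((hmem x).mp hc))]
      rfl

theorem main_eq (line : List (List Int)) (hpre : Pre_solution line) :
    solution line = solution_alt line := by
  obtain ⟨hlen3, i0, hi0, j0, hj0, hij0, hcross⟩ := hpre
  have hx0 : pval line (i0 : Int) (j0 : Int) ∈ aVertex line := by
    rw [mem_aVertex]
    refine ⟨(i0 : Int), ?_, (j0 : Int), ?_, ?_, rfl⟩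
    · rw [PySem.List.mem_pyRange_one]
      simp only [List.mem_range] at hi0
      omega
    · rw [PySem.List.mem_pyRange_one]
      simp only [List.mem_range] at hj0
      omega
    · obtain ⟨hden, hm1, hm2⟩ := hcross
      simp only [pcond, condB, PySem.List.pyGetD_natCast]
      refine ⟨by exact_mod_cast hij0, hden, hm1, ?_⟩
      rw [PySem.Int.mod_eq_zero_iff_dvd] at hm2 ⊢
      exact dvd_sub_comm.mp hm2
  have hperm := perm_vertex_pts line
  have hmm : ∀ x, x ∈ PySem.Set.ofList (aVertex line) ↔ x ∈ bPts line :=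
    fun x => hperm.mem_iff
  have hvne : PySem.Set.ofList (aVertex line) ≠ [] := by
    intro h
    have := (PySem.Set.mem_ofList (aVertex line) _).mpr hx0
    rw [h] at this
    exact List.not_mem_nil this
  have hpne : bPts line ≠ [] := by
    intro h
    have h2 := hperm
    rw [h] at h2
    exact hvne h2.eq_nil
  set vs := PySem.Set.ofList (aVertex line) with hvsdef
  set pts := bPts line with hptsdef
  have hfst : (vs.map Prod.fst).Perm (pts.map Prod.fst) := hperm.map _
  have hsnd : (vs.map Prod.snd).Perm (pts.map Prod.snd) := hperm.map _
  have hfstne : pts.map Prod.fst ≠ [] := by simpa [List.map_eq_nil_iff]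
  have hsndne : pts.map Prod.snd ≠ [] := by simpa [List.map_eq_nil_iff]
  set minX := (PySem.List.min? (pts.map Prod.fst) (fun z => z)).getD 0 with hminXdef
  set maxX := (PySem.List.max? (pts.map Prod.fst) (fun z => z)).getD 0 with hmaxXdef
  set minY := (PySem.List.min? (pts.map Prod.snd) (fun z => z)).getD 0 with hminYdef
  set maxY := (PySem.List.max? (pts.map Prod.snd) (fun z => z)).getD 0 with hmaxYdef
  have heqmaxX : (PySem.List.max? (vs.map Prod.fst) (fun z => z)).getD 0 = maxX :=
    extremum_max _ _ hfst
  have heqminX : (PySem.List.min? (vs.map Prod.fst) (fun z => z)).getD 0 = minX :=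
    extremum_min _ _ hfst
  have heqmaxY : (PySem.List.max? (vs.map Prod.snd) (fun z => z)).getD 0 = maxY :=
    extremum_max _ _ hsnd
  have heqminY : (PySem.List.min? (vs.map Prod.snd) (fun z => z)).getD 0 = minY :=
    extremum_min _ _ hsnd
  have hmaxX' : ∀ p ∈ vs, p.1 ≤ maxX := fun p hp =>
    max?_getD_bound _ hfstne p.1 (List.mem_map_of_mem ((hmm p).mp hp))
  have hminX' : ∀ p ∈ vs, minX ≤ p.1 := fun p hp =>
    min?_getD_bound _ hfstne p.1 (List.mem_map_of_mem ((hmm p).mp hp))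
  have hmaxY' : ∀ p ∈ vs, p.2 ≤ maxY := fun p hp =>
    max?_getD_bound _ hsndne p.2 (List.mem_map_of_mem ((hmm p).mp hp))
  have hminY' : ∀ p ∈ vs, minY ≤ p.2 := fun p hp =>
    min?_getD_bound _ hsndne p.2 (List.mem_map_of_mem ((hmm p).mp hp))
  obtain ⟨p0, hp0⟩ := List.exists_mem_of_ne_nil _ hvne
  have hxy : minX ≤ maxX ∧ minY ≤ maxY :=
    ⟨le_trans (hminX' p0 hp0) (hmaxX' p0 hp0), le_trans (hminY' p0 hp0) (hmaxY' p0 hp0)⟩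
  have hlen : PySem.Set.len pts = (vs.length : Int) := by
    simp [PySem.Set.len, hperm.length_eq]
  simp only [solution, solution_alt, ← hvsdef, ← hptsdef]
  rw [if_neg hvne, if_neg hpne, heqmaxX, heqminX, heqmaxY, heqminY]
  by_cases h1 : vs.length = 1
  · rw [if_pos h1, if_pos (by rw [hlen, h1]; rfl)]
  · rw [if_neg h1, if_neg (by rw [hlen]; intro h; exact h1 (by exact_mod_cast h)),
      PySem.List.slice?_none_none_neg_one, Option.getD_some]
    refine (render_eq vs pts hmm minX maxX minY maxY hminX' hmaxX' hminY' hmaxY' hxy.1 hxy.2).trans ?_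
    have hfold := (foldl_snoc (PySem.List.pyRange maxY (minY - 1) (-1))
      (fun y => PySem.Str.join ""
        (((PySem.List.sorted ((pts.foldl (fun (d : PySem.Dict Int (List Int)) p =>
              d.modify p.2 [] (fun l => l ++ [p.1])) PySem.Dict.empty).getD y [])
            (fun z => z) false).foldl
            (fun (acc : List String × Int) x => (acc.1 ++ [dots (x - acc.2), "*"], x + 1))
            ([], minX)).1
          ++ [dots (maxX - ((PySem.List.sorted ((pts.foldl (fun (d : PySem.Dict Int (List Int)) p =>
              d.modify p.2 [] (fun l => l ++ [p.1])) PySem.Dict.empty).getD y [])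
            (fun z => z) false).foldl
            (fun (acc : List String × Int) x => (acc.1 ++ [dots (x - acc.2), "*"], x + 1))
            ([], minX)).2 + 1)])) ([] : List String)).trans (List.nil_append _)
    refine Eq.trans ?_ hfold.symm
    apply List.map_congr_left
    intro y _
    refine (gaprow_eq pts _ minX maxX y ?_ ?_ ?_ ?_).symm
    · intro x
      rw [rows_getD]
      exact mem_rowcols pts y x
    · rw [rows_getD]
      exact rowcols_sorted_lt pts (nodup_bPts line) y
    · exact fun p hp => min?_getD_bound _ hfstne p.1 (List.mem_map_of_mem hp)
    · exact fun p hp => max?_getD_bound _ hfstne p.1 (List.mem_map_of_mem hp)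

-- ===== VERDICT (by name: the statement is the Claim_ definition above) =====
theorem solution_spec : Claim_equal_solution := by
  intro line _hdom hpre
  unfold Spec_solution
  exact main_eq line hpre
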